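-- pv_equiv track=rewrite | github.com/ldct/cp | FHC/2021/quals/A1/A.py | cost_c
-- ===== SOURCE A (Python) =====
-- VOWELS = "AEIOU"
--
-- def cost_c(S, c):
--     ret = 0
--     for d in S:
--         if d == c: continue
--         r1 = c in VOWELS
--         r2 = d in VOWELS
--         if r1 == r2:
--             ret += 2
--         else:
--             ret += 1
--     return ret
-- ===== SOURCE B (Python) =====
-- VOWELS = "AEIOU"
--
-- def cost_c(S, c):
--     # Category counting instead of per-character branch accumulation:
--     # cost = 2*count_same_class(excluding c itself) + 1*count_other_class
--     #      = (same_class_total - count_c) + (n - count_c)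
--     n = len(S)
--     V = sum(1 for d in S if d in VOWELS)
--     count_c = sum(1 for d in S if d == c)
--     same_class_total = V if c in VOWELS else n - V
--     return (same_class_total - count_c) + (n - count_c)
-- ===== Notes on version B (the rewrite author's own statement) =====
-- stated objective: alternative
-- what changed: Replaces the per-character if/else cost accumulation by three category counts (length, vowels, occurrences of c) combined in a closed-form expression.
import Mathlib
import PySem

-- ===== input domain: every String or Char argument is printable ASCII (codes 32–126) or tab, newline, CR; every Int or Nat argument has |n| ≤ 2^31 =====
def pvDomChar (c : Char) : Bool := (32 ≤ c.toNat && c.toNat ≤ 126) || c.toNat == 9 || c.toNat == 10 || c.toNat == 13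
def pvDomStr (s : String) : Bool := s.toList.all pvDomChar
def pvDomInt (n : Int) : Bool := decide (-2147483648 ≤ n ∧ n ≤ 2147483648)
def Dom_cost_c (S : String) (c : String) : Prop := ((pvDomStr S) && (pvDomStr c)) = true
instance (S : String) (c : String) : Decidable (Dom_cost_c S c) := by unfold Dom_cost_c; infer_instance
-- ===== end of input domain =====

-- B replaces A's per-character if/else accumulation by three category counts (length, vowels,
-- occurrences of c) combined in a closed-form expression; objective: alternative (same cost).
-- ===== PORT A =====
-- `d == c` (1-char string vs string) is ported as `c.toList == [d]`; `d in VOWELS` for a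
-- single char d is `PySem.Chars.isIn [d] vowels` (substring membership, exact); `c in VOWELS`
-- is `PySem.Str.isIn c "AEIOU"` (substring membership, exact).
def pvVowels : List Char := ['A','E','I','O','U']

def cost_c (S : String) (c : String) : Int :=
  S.toList.foldl (fun ret d =>
    if c.toList == [d] then ret
    else
      let r1 := PySem.Str.isIn c "AEIOU"
      let r2 := PySem.Chars.isIn [d] pvVowels
      if r1 == r2 then ret + 2 else ret + 1) 0

-- ===== PORT B =====
def cost_c_alt (S : String) (c : String) : Int :=
  let n : Int := S.toList.length
  let V : Int := S.toList.countP (fun d => PySem.Chars.isIn [d] pvVowels)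
  let countC : Int := S.toList.countP (fun d => c.toList == [d])
  let sameTotal : Int := if PySem.Str.isIn c "AEIOU" then V else n - V
  (sameTotal - countC) + (n - countC)

-- ===== PRECONDITION & SPEC =====
def Spec_cost_c (S : String) (c : String) (out : Int) : Prop := out = cost_c_alt S c
instance (S : String) (c : String) (out : Int) : Decidable (Spec_cost_c S c out) := by unfold Spec_cost_c; infer_instance

-- ===== CLAIM (what is proved, stated in full; the proofs are below) =====
def Claim_equal_cost_c : Prop := ∀ (S : String) (c : String), Dom_cost_c S c → Spec_cost_c S c (cost_c S c)

-- ===== LEMMAS AND PROOFS =====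

-- per-character weight of A's loop
def pvW (c : String) (d : Char) : Int :=
  if c.toList == [d] then 0
  else if PySem.Str.isIn c "AEIOU" == PySem.Chars.isIn [d] pvVowels then 2 else 1

lemma vowels_toList : "AEIOU".toList = pvVowels := by decide

lemma fold_eq_sum (c : String) (l : List Char) (ret : Int) :
    l.foldl (fun ret d =>
      if c.toList == [d] then ret
      else
        let r1 := PySem.Str.isIn c "AEIOU"
        let r2 := PySem.Chars.isIn [d] pvVowels
        if r1 == r2 then ret + 2 else ret + 1) ret
    = ret + (l.map (pvW c)).sum := by
  calc l.foldl (fun ret d =>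
      if c.toList == [d] then ret
      else
        let r1 := PySem.Str.isIn c "AEIOU"
        let r2 := PySem.Chars.isIn [d] pvVowels
        if r1 == r2 then ret + 2 else ret + 1) ret
      = l.foldl (fun ret d => ret + pvW c d) ret :=
        PySem.List.foldl_congr_mem' _ _ _ _ (by
          intro x _ acc
          unfold pvW
          by_cases ha : (c.toList == [x]) = true
          · simp [ha]
          · simp [ha]
            split_ifs <;> ring)
    _ = ret + (l.map (pvW c)).sum := PySem.List.foldl_add _ _ _

lemma sum_eq (c : String) (l : List Char) :
    (l.map (pvW c)).sum =
      ((if PySem.Str.isIn c "AEIOU"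
          then (l.countP (fun d => PySem.Chars.isIn [d] pvVowels) : Int)
          else (l.length : Int) - l.countP (fun d => PySem.Chars.isIn [d] pvVowels))
        - l.countP (fun d => c.toList == [d]))
      + ((l.length : Int) - l.countP (fun d => c.toList == [d])) := by
  induction l with
  | nil => simp
  | cons d t ih =>
    simp only [List.map_cons, List.sum_cons, List.countP_cons, List.length_cons, pvW]
    by_cases hcl : c.toList = [d]
    · have hr : PySem.Str.isIn c "AEIOU" = PySem.Chars.isIn [d] pvVowels := by
        simp only [PySem.Str.isIn, hcl, vowels_toList]
      cases h2 : PySem.Chars.isIn [d] pvVowels <;>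
        · rw [ih]
          simp only [hcl, hr, h2]
          simp
          try push_cast
          try ring
    · have hb : (c.toList == [d]) = false := by simp [hcl]
      cases h1 : PySem.Str.isIn c "AEIOU" <;> cases h2 : PySem.Chars.isIn [d] pvVowels <;>
        · rw [ih]
          simp only [hb, h1]
          try simp only [h2]
          simp
          try push_cast
          try ring

-- ===== VERDICT (by name: the statement is the Claim_ definition above) =====
theorem cost_c_spec : Claim_equal_cost_c := by
  intro S c _
  show cost_c S c = cost_c_alt S c
  unfold cost_c cost_c_alt
  rw [fold_eq_sum, sum_eq]
  simp
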